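-- pv_equiv track=rewrite | github.com/gluensdorf/tachymeter_filter_script | formatter.py | split_at_minus_and_plus
-- ===== SOURCE A (Python) =====
-- def split_at_minus_and_plus(list_of_data):
--     """
--     Splits each value for each element of list_of_data at '+' or '-'.
--     From the list of splitted values keep the last element.
--
--     Returns a list holding lists of fractional values.
--     """
--
--     for idx_a, ele in enumerate(list_of_data):
--         split_plus = [value.split('+') for value in ele]
--         for idx_b, bar in enumerate(split_plus):
--             if '-' in bar[-1]:
--                 split_minus = bar[-1].split('-')
--                 split_plus[idx_b] = [split_minus[-1]]
--         for idx_b, bar in enumerate(split_plus):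
--             list_of_data[idx_a][idx_b] = bar[-1]
--     return list_of_data
-- ===== SOURCE B (Python) =====
-- def split_at_minus_and_plus(list_of_data):
--     """
--     Splits each value for each element of list_of_data at '+' or '-'.
--     From the list of splitted values keep the last element.
--
--     Returns a list holding lists of fractional values.
--     """
--     for row in list_of_data:
--         for i, s in enumerate(row):
--             tail = []
--             for ch in s:
--                 if ch == '+' or ch == '-':
--                     tail.clear()
--                 else:
--                     tail.append(ch)
--             row[i] = ''.join(tail)
--     return list_of_data
-- ===== Notes on version B (the rewrite author's own statement) =====
-- stated objective: simpler
-- what changed: Replaces the two-stage split('+')-then-conditionally-split('-') list building with a single character pass per string that resets an accumulator at every '+'/'-', so no intermediate lists of pieces are ever built.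
import Mathlib
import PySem

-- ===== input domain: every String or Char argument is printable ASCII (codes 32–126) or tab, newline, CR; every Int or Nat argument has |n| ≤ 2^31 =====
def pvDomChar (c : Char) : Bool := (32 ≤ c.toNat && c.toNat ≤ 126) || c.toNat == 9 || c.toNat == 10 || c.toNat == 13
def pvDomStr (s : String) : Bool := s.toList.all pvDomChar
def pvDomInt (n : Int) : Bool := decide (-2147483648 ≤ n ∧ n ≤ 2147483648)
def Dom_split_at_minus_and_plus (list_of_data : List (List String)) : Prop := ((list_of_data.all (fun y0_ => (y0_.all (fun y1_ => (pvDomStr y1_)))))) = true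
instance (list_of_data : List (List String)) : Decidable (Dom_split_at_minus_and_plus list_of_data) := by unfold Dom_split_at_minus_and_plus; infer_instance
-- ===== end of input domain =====

-- B replaces A's split('+')-then-conditionally-split('-') list building with a single
-- character pass per string that resets an accumulator at each '+'/'-' (simpler); both
-- Pythons mutate list_of_data in place identically and return it — the theorems below
-- are about the return value.

-- ===== PORT A =====
-- Python's value.split('+') always returns a nonempty list, so bar[-1] never raises:
-- the .getD defaults below are never consulted.
def split_at_minus_and_plus (list_of_data : List (List String)) : List (List String) :=
  list_of_data.map (fun ele =>
    let split_plus := ele.map (fun value => (PySem.Str.split? value "+").getD [])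
    let split_plus := split_plus.map (fun bar =>
      let lastPiece := (PySem.List.pyGet? bar (-1)).getD ""
      if PySem.Str.isIn "-" lastPiece then
        let split_minus := (PySem.Str.split? lastPiece "-").getD []
        [(PySem.List.pyGet? split_minus (-1)).getD ""]
      else bar)
    split_plus.map (fun bar => (PySem.List.pyGet? bar (-1)).getD ""))

-- ===== PORT B =====
def pvIsSep (c : Char) : Bool := c == '+' || c == '-'

def split_at_minus_and_plus_alt (list_of_data : List (List String)) : List (List String) :=
  list_of_data.map (fun row =>
    row.map (fun s =>
      String.ofList (s.toList.foldl (fun tail ch => if pvIsSep ch then [] else tail ++ [ch]) [])))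

-- ===== PRECONDITION & SPEC =====
def Spec_split_at_minus_and_plus (list_of_data : List (List String)) (out : List (List String)) : Prop := out = split_at_minus_and_plus_alt list_of_data
instance (list_of_data : List (List String)) (out : List (List String)) : Decidable (Spec_split_at_minus_and_plus list_of_data out) := by unfold Spec_split_at_minus_and_plus; infer_instance

-- ===== CLAIM (what is proved, stated in full; the proofs are below) =====
def Claim_equal_split_at_minus_and_plus : Prop := ∀ (list_of_data : List (List String)), Dom_split_at_minus_and_plus list_of_data → Spec_split_at_minus_and_plus list_of_data (split_at_minus_and_plus list_of_data)

-- ===== LEMMAS AND PROOFS =====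

-- Specification function: the suffix of cs after its last character satisfying p.
def pvAfter (p : Char → Bool) : List Char → List Char
  | [] => []
  | c :: cs => if cs.any p then pvAfter p cs else if p c then cs else c :: cs

-- Reference (front-recursive) form of Python's s.split(p) for a one-character separator.
def pvSplits (p : Char) : List Char → List (List Char)
  | [] => [[]]
  | c :: cs =>
    if c = p then [] :: pvSplits p cs
    else (c :: (pvSplits p cs).headI) :: (pvSplits p cs).tail

theorem pvSplits_ne_nil (p : Char) (cs : List Char) : pvSplits p cs ≠ [] := by
  cases cs with
  | nil => simp [pvSplits]
  | cons c cs => by_cases h : c = p <;> simp [pvSplits, h]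

theorem pvAfter_snoc (p : Char → Bool) (cs : List Char) (c : Char) :
    pvAfter p (cs ++ [c]) = if p c then [] else pvAfter p cs ++ [c] := by
  induction cs with
  | nil => by_cases h : p c <;> simp [pvAfter, h]
  | cons d cs ih =>
    by_cases hc : p c
    · have h1 : (cs ++ [c]).any p = true := by simp [hc]
      simp [pvAfter, h1, ih, hc]
    · by_cases hcs : cs.any p
      · have h1 : (cs ++ [c]).any p = true := by simp [hcs]
        simp [pvAfter, h1, ih, hc, hcs]
      · have h1 : (cs ++ [c]).any p = false := by
          simp only [List.any_append, List.any_cons, List.any_nil]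
          simp [hcs, hc]
        by_cases hd : p d <;> simp [pvAfter, h1, hd, hc, hcs]

theorem pvAfter_of_not_any (p : Char → Bool) (cs : List Char) (h : cs.any p = false) :
    pvAfter p cs = cs := by
  cases cs with
  | nil => rfl
  | cons c cs =>
    simp only [List.any_cons, Bool.or_eq_false_iff] at h
    simp [pvAfter, h.1, h.2]

theorem pvSplits_of_not_any (p : Char) (cs : List Char) (h : cs.any (· == p) = false) :
    pvSplits p cs = [cs] := by
  induction cs with
  | nil => rfl
  | cons c cs ih =>
    simp only [List.any_cons, Bool.or_eq_false_iff] at h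
    have hc : ¬ c = p := by simpa using h.1
    have := ih (by simpa using h.2)
    simp [pvSplits, hc, this]

theorem length_pvSplits (p : Char) (cs : List Char) :
    (pvSplits p cs).length = cs.count p + 1 := by
  induction cs with
  | nil => simp [pvSplits]
  | cons c cs ih =>
    by_cases h : c = p
    · simp [pvSplits, h, ih]
    · have hne := pvSplits_ne_nil p cs
      have hlen : (pvSplits p cs).length ≥ 1 := by
        cases hh : pvSplits p cs with
        | nil => exact absurd hh hne
        | cons a l => simp
      have hb : (c == p) = false := by simp [h]
      rw [pvSplits]
      simp [h, ih]

theorem pvGetLast?_cons_of_ne_nil {α : Type} (x : α) {l : List α} (h : l ≠ []) :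
    (x :: l).getLast? = l.getLast? := by
  cases l with
  | nil => simp at h
  | cons y t => simp [List.getLast?_cons]

theorem getLast?_pvSplits (p : Char) (cs : List Char) :
    (pvSplits p cs).getLast? = some (pvAfter (· == p) cs) := by
  induction cs with
  | nil => simp [pvSplits, pvAfter]
  | cons c cs ih =>
    by_cases h : c = p
    · have hne := pvSplits_ne_nil p cs
      rw [pvSplits]
      simp only [h, if_true]
      rw [pvGetLast?_cons_of_ne_nil _ hne, ih]
      by_cases hany : cs.any (· == p)
      · simp [pvAfter, hany]
      · simp only [Bool.not_eq_true] at hany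
        simp [pvAfter, hany, pvAfter_of_not_any _ _ hany]
    · by_cases hany : cs.any (· == p)
      · have hcount : 1 ≤ cs.count p := by
          rcases List.any_eq_true.mp hany with ⟨a, ha, hpa⟩
          have : a = p := by simpa using hpa
          subst this
          exact List.one_le_count_iff.mpr ha
        have hlen : 2 ≤ (pvSplits p cs).length := by
          rw [length_pvSplits]; omega
        obtain ⟨x, y, l, hxy⟩ : ∃ x y l, pvSplits p cs = x :: y :: l := by
          rcases hsp : pvSplits p cs with - | ⟨x, - | ⟨y, l⟩⟩
          · rw [hsp] at hlen; simp at hlen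
          · rw [hsp] at hlen; simp at hlen
          · exact ⟨_, _, _, rfl⟩
        rw [pvSplits]
        simp only [h, if_false, hxy, List.headI, List.tail_cons]
        have h2 : (pvSplits p cs).getLast? = (y :: l).getLast? := by
          rw [hxy]; exact pvGetLast?_cons_of_ne_nil x (by simp)
        rw [pvGetLast?_cons_of_ne_nil (c :: x) (l := y :: l) (by simp), ← h2, ih]
        simp [pvAfter, hany]
      · simp only [Bool.not_eq_true] at hany
        have hb : (c == p) = false := by simp [h]
        rw [pvSplits]
        simp only [h, if_false, pvSplits_of_not_any p cs hany, List.headI, List.tail_cons]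
        simp [pvAfter, hany, hb]

theorem pyGet?_neg_one {α : Type} (xs : List α) : PySem.List.pyGet? xs (-1) = xs.getLast? := by
  cases xs with
  | nil => simp [PySem.List.pyGet?, PySem.List.pyIdx?]
  | cons x l =>
    simp only [PySem.List.pyGet?, PySem.List.pyIdx?]
    have h1 : ¬ (0 : Int) ≤ -1 := by norm_num
    have h2 : -((x :: l).length : Int) ≤ -1 := by
      simp only [List.length_cons]; push_cast; omega
    have h3 : (x :: l).length - (-(-1 : Int)).toNat = l.length := by simp
    rw [if_neg h1, if_pos h2, Option.bind_some, h3, List.getLast?_eq_getElem?]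
    simp

-- Python's fuel-based splitOn.go, for a one-character separator, computes pvSplits.
theorem splitOn_go_eq (p : Char) :
    ∀ fuel (l cur : List Char) (acc : List (List Char)), l.length < fuel →
      PySem.Chars.splitOn.go [p] fuel l cur acc =
        acc.reverse ++ (pvSplits p l).modifyHead (cur.reverse ++ ·) := by
  intro fuel
  induction fuel with
  | zero => intro l cur acc h; omega
  | succ n ih =>
    intro l cur acc h
    cases l with
    | nil => simp [PySem.Chars.splitOn.go, pvSplits]
    | cons c rest =>
      rw [PySem.Chars.splitOn.go]
      by_cases hc : c = p
      · have hpre : List.isPrefixOf [p] (c :: rest) = true := by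
          simp [List.isPrefixOf, hc]
        rw [if_pos hpre]
        have hdrop : List.drop [p].length (c :: rest) = rest := by simp
        rw [hdrop, ih rest [] (cur.reverse :: acc) (by simp at h ⊢; omega)]
        obtain ⟨x, t, hxt⟩ : ∃ x t, pvSplits p rest = x :: t := by
          rcases hsp : pvSplits p rest with - | ⟨x, t⟩
          · exact absurd hsp (pvSplits_ne_nil p rest)
          · exact ⟨_, _, rfl⟩
        rw [pvSplits]
        simp [hc, hxt]
      · have hpre : List.isPrefixOf [p] (c :: rest) = false := by
          simp [List.isPrefixOf]
          exact fun hh => absurd hh.symm hc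
        rw [if_neg (by simp [hpre])]
        rw [ih rest (c :: cur) acc (by simp at h ⊢; omega)]
        obtain ⟨x, t, hxt⟩ : ∃ x t, pvSplits p rest = x :: t := by
          rcases hsp : pvSplits p rest with - | ⟨x, t⟩
          · exact absurd hsp (pvSplits_ne_nil p rest)
          · exact ⟨_, _, rfl⟩
        rw [pvSplits]
        simp [hc, hxt]

theorem splitOn_single (cs : List Char) (p : Char) :
    PySem.Chars.splitOn cs [p] = pvSplits p cs := by
  rw [PySem.Chars.splitOn, splitOn_go_eq p (cs.length + 1) cs [] [] (by omega)]
  obtain ⟨x, t, hxt⟩ : ∃ x t, pvSplits p cs = x :: t := by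
    rcases hsp : pvSplits p cs with - | ⟨x, t⟩
    · exact absurd hsp (pvSplits_ne_nil p cs)
    · exact ⟨_, _, rfl⟩
  simp [hxt]

theorem split?_single (s sep : String) (p : Char) (hsep : sep.toList = [p]) :
    (PySem.Str.split? s sep).getD [] = (pvSplits p s.toList).map String.ofList := by
  rw [PySem.Str.split?, hsep, PySem.Chars.split?]
  simp only [List.isEmpty_cons, Bool.false_eq_true, if_false, Option.map_some, Option.getD_some,
    splitOn_single]

theorem mem_iff_singleton_infix {c : Char} {l : List Char} : [c] <:+: l ↔ c ∈ l := by
  constructor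
  · intro h
    exact List.singleton_sublist.mp h.sublist
  · intro h
    rcases List.append_of_mem h with ⟨s, t, rfl⟩
    exact ⟨s, t, by simp⟩

-- Last piece of Python's s.split(sep) (one-char sep), as a string.
theorem lastPiece_eq (cs : List Char) (p : Char) :
    (PySem.List.pyGet? ((pvSplits p cs).map String.ofList) (-1)).getD "" =
      String.ofList (pvAfter (· == p) cs) := by
  rw [pyGet?_neg_one, List.getLast?_map, getLast?_pvSplits]
  rfl

-- A's per-string transformation equals B's single resetting pass.
theorem perString (s : String) :
    (PySem.List.pyGet?
        (if PySem.Str.isIn "-"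
              ((PySem.List.pyGet? ((PySem.Str.split? s "+").getD []) (-1)).getD "") then
           [(PySem.List.pyGet?
               ((PySem.Str.split?
                   ((PySem.List.pyGet? ((PySem.Str.split? s "+").getD []) (-1)).getD "")
                   "-").getD []) (-1)).getD ""]
         else (PySem.Str.split? s "+").getD []) (-1)).getD "" =
      String.ofList (s.toList.foldl (fun tail ch => if pvIsSep ch then [] else tail ++ [ch]) []) := by
  have hplus : (PySem.Str.split? s "+").getD [] = (pvSplits '+' s.toList).map String.ofList :=
    split?_single s "+" '+' (by decide)
  have hlastp : (PySem.List.pyGet? ((PySem.Str.split? s "+").getD []) (-1)).getD "" =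
      String.ofList (pvAfter (· == '+') s.toList) := by
    rw [hplus, lastPiece_eq]
  set t := pvAfter (· == '+') s.toList with ht
  -- the right-hand side: the fold is pvAfter pvIsSep
  have hfold : ∀ cs : List Char,
      cs.foldl (fun tail ch => if pvIsSep ch then [] else tail ++ [ch]) [] = pvAfter pvIsSep cs := by
    intro cs
    induction cs using List.reverseRecOn with
    | nil => rfl
    | append_singleton cs c ih =>
      rw [List.foldl_append, List.foldl_cons, List.foldl_nil, pvAfter_snoc]
      by_cases hc : pvIsSep c
      · simp [hc]
      · simp [hc, ih]
  -- composition: pvAfter '-' ∘ pvAfter '+' = pvAfter pvIsSep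
  have hcomp : ∀ cs : List Char,
      pvAfter (· == '-') (pvAfter (· == '+') cs) = pvAfter pvIsSep cs := by
    intro cs
    induction cs using List.reverseRecOn with
    | nil => rfl
    | append_singleton cs c ih =>
      by_cases h1 : c = '+'
      · subst h1; simp [pvAfter_snoc, pvIsSep, pvAfter]
      · by_cases h2 : c = '-'
        · subst h2; simp [pvAfter_snoc, pvIsSep]
        · have hs : pvIsSep c = false := by simp [pvIsSep, h1, h2]
          have hb1 : (c == '+') = false := by simp [h1]
          have hb2 : (c == '-') = false := by simp [h2]
          simp [pvAfter_snoc, hb1, hb2, hs, ih]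
  rw [hfold, ← hcomp]
  by_cases hmem : '-' ∈ t
  · have hin : PySem.Str.isIn "-" ((PySem.List.pyGet? ((PySem.Str.split? s "+").getD []) (-1)).getD "") = true := by
      rw [hlastp, PySem.Str.isIn, PySem.Chars.isIn_iff_infix]
      have e : ("-" : String).toList = ['-'] := rfl
      rw [e, String.toList_ofList]
      exact mem_iff_singleton_infix.mpr hmem
    rw [if_pos hin, hlastp]
    have hminus : (PySem.Str.split? (String.ofList t) "-").getD [] =
        (pvSplits '-' t).map String.ofList := by
      have := split?_single (String.ofList t) "-" '-' (by decide)
      simpa using this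
    rw [hminus, lastPiece_eq, pyGet?_neg_one]
    rw [List.getLast?_singleton, Option.getD_some]
  · have hin : PySem.Str.isIn "-" ((PySem.List.pyGet? ((PySem.Str.split? s "+").getD []) (-1)).getD "") = false := by
      rw [hlastp, PySem.Str.isIn]
      rw [PySem.Chars.isIn_eq_false_iff]
      have e : ("-" : String).toList = ['-'] := rfl
      rw [e, String.toList_ofList]
      exact fun hc => hmem (mem_iff_singleton_infix.mp hc)
    rw [if_neg (by simp only [hin]; exact Bool.false_ne_true), hlastp]
    have hany : t.any (· == '-') = false := by
      simp only [List.any_eq_false]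
      intro a ha hh
      exact hmem ((beq_iff_eq.mp hh) ▸ ha)
    rw [pvAfter_of_not_any _ _ hany]

-- ===== VERDICT (by name: the statement is the Claim_ definition above) =====
theorem split_at_minus_and_plus_spec : Claim_equal_split_at_minus_and_plus := by
  intro list_of_data _
  unfold Spec_split_at_minus_and_plus split_at_minus_and_plus split_at_minus_and_plus_alt
  simp only [List.map_map]
  refine List.map_congr_left (fun ele _ => ?_)
  refine List.map_congr_left (fun s _ => ?_)
  simp only [Function.comp_def]
  exact perString s
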